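-- pv_equiv track=rewrite | github.com/lakshyarawal/pythonPractice | Hashing/longest_common_subarray_with_given_sum.py | longest_common_sub
-- ===== SOURCE A (Python) =====
-- def longest_common_sub(arr, arr2) -> int:
--     result = 0
--     n = len(arr)
--     for i in range(n):
--         curr_sum1, curr_sum2 = 0, 0
--         for j in range(i, n):
--             curr_sum1 += arr[j]
--             curr_sum2 += arr2[j]
--             if curr_sum1 == curr_sum2:
--                 result = max(result, j-i + 1)
--     return result
-- ===== SOURCE B (Python) =====
-- def longest_common_sub(arr, arr2) -> int:
--     # Prefix sums of the difference array + first-occurrence hashmap (longest zero-sum subarray), O(n).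
--     first = {0: -1}
--     s = 0
--     best = 0
--     for i, a in enumerate(arr):
--         s += a - arr2[i]
--         if s in first:
--             best = max(best, i - first[s])
--         else:
--             first[s] = i
--     return best
-- ===== Notes on version B (the rewrite author's own statement) =====
-- stated objective: faster
-- what changed: Replaced the quadratic all-subarrays double loop (two running sums per start index) by a single pass over the prefix sums of the difference array with a hashmap of each prefix value's first occurrence (longest zero-sum subarray).
import Mathlib
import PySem

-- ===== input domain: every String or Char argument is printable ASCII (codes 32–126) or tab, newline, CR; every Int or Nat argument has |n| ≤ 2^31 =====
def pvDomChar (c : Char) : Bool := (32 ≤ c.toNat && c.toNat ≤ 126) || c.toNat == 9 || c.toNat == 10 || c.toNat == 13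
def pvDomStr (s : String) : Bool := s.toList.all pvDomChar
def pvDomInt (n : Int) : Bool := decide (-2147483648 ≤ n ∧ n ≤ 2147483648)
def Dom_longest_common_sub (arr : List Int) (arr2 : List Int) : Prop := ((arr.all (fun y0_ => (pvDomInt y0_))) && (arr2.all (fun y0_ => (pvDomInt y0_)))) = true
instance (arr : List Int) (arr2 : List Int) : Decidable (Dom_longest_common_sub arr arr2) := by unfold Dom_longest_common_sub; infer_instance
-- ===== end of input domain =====

-- B replaces A's quadratic double loop by one pass over prefix sums of the difference
-- array with a first-occurrence hashmap (objective: faster, asymptotic O(n^2) → O(n)).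

-- ===== PORT A =====
-- literal transliteration of A; arr[j]/arr2[j] as pyGetD, in range under Pre_
def longest_common_sub (arr : List Int) (arr2 : List Int) : Int :=
  let n : Int := arr.length
  (PySem.List.pyRange 0 n 1).foldl (fun result i =>
    ((PySem.List.pyRange i n 1).foldl
      (fun (st : Int × Int × Int) j =>
        let c1 := st.2.1 + PySem.List.pyGetD arr j 0
        let c2 := st.2.2 + PySem.List.pyGetD arr2 j 0
        (if c1 = c2 then max st.1 (j - i + 1) else st.1, c1, c2))
      (result, 0, 0)).1) 0

-- ===== PORT B =====
-- literal transliteration of Source B; state = (first, s, best); arr2[i] as pyGetD, in range under Pre_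
def longest_common_sub_alt (arr : List Int) (arr2 : List Int) : Int :=
  let st := (PySem.List.enumerate arr).foldl
    (fun (st : PySem.Dict Int Int × Int × Int) p =>
      let s := st.2.1 + (p.2 - PySem.List.pyGetD arr2 p.1 0)
      match st.1.get? s with
      | some f => (st.1, s, max st.2.2 (p.1 - f))
      | none => (st.1.insert s p.1, s, st.2.2))
    (PySem.Dict.ofList [(0, -1)], 0, 0)
  st.2.2

-- ===== PRECONDITION & SPEC =====
-- Pre_ excludes exactly the inputs where the Pythons raise IndexError: len(arr2) < len(arr)
def Pre_longest_common_sub (arr : List Int) (arr2 : List Int) : Prop := arr.length ≤ arr2.length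
instance (arr : List Int) (arr2 : List Int) : Decidable (Pre_longest_common_sub arr arr2) := by unfold Pre_longest_common_sub; infer_instance
def pvWitness_longest_common_sub : List Int × List Int := ([1, 2, 3], [3, 2, 1])

def Spec_longest_common_sub (arr : List Int) (arr2 : List Int) (out : Int) : Prop := out = longest_common_sub_alt arr arr2
instance (arr : List Int) (arr2 : List Int) (out : Int) : Decidable (Spec_longest_common_sub arr arr2 out) := by unfold Spec_longest_common_sub; infer_instance

-- ===== CLAIM (what is proved, stated in full; the proofs are below) =====
def Claim_equal_longest_common_sub : Prop := ∀ (arr : List Int) (arr2 : List Int), Dom_longest_common_sub arr arr2 → Pre_longest_common_sub arr arr2 → Spec_longest_common_sub arr arr2 (longest_common_sub arr arr2)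

-- ===== LEMMAS AND PROOFS =====

-- prefix sum of xs.getD, and of the difference array
def psum (xs : List Int) : Nat → Int
  | 0 => 0
  | k + 1 => psum xs k + xs.getD k 0

def pre2 (arr arr2 : List Int) (k : Nat) : Int := psum arr k - psum arr2 k

-- the common characterisation: r is the length of the longest equal-sum subarray (0 if none)
def IsAns (arr arr2 : List Int) (r : Int) : Prop :=
  0 ≤ r ∧
  (∀ i j : Nat, i ≤ j → j < arr.length → pre2 arr arr2 (j + 1) = pre2 arr arr2 i → (j : Int) - i + 1 ≤ r) ∧
  (r = 0 ∨ ∃ i j : Nat, i ≤ j ∧ j < arr.length ∧ pre2 arr arr2 (j + 1) = pre2 arr arr2 i ∧ r = (j : Int) - i + 1)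

theorem isAns_unique {arr arr2 : List Int} {r1 r2 : Int}
    (h1 : IsAns arr arr2 r1) (h2 : IsAns arr arr2 r2) : r1 = r2 := by
  obtain ⟨h1n, h1u, h1c⟩ := h1
  obtain ⟨h2n, h2u, h2c⟩ := h2
  have le12 : r1 ≤ r2 := by
    rcases h1c with h | ⟨i, j, hij, hj, hp, hr⟩
    · omega
    · have := h2u i j hij hj hp; omega
  have le21 : r2 ≤ r1 := by
    rcases h2c with h | ⟨i, j, hij, hj, hp, hr⟩
    · omega
    · have := h1u i j hij hj hp; omega
  omega

-- ---------- A side ----------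

-- result of A's inner loop for start index i after t iterations, starting from res0
def innerRes (arr arr2 : List Int) (i : Nat) (res0 : Int) : Nat → Int
  | 0 => res0
  | t + 1 =>
    let r := innerRes arr arr2 i res0 t
    if pre2 arr arr2 (i + t + 1) = pre2 arr arr2 i then max r ((t : Int) + 1) else r

-- A's result after u outer iterations
def outerRes (arr arr2 : List Int) : Nat → Int
  | 0 => 0
  | u + 1 => innerRes arr arr2 u (outerRes arr arr2 u) (arr.length - u)

theorem innerA (arr arr2 : List Int) (i : Nat) (res0 : Int) (t : Nat) :
    ((List.range t).map (fun k : Nat => ((i : Int) + (k : Int)))).foldl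
      (fun (st : Int × Int × Int) j =>
        let c1 := st.2.1 + PySem.List.pyGetD arr j 0
        let c2 := st.2.2 + PySem.List.pyGetD arr2 j 0
        (if c1 = c2 then max st.1 (j - (i : Int) + 1) else st.1, c1, c2))
      (res0, 0, 0)
    = (innerRes arr arr2 i res0 t,
       psum arr (i + t) - psum arr i,
       psum arr2 (i + t) - psum arr2 i) := by
  induction t with
  | zero => simp [innerRes]
  | succ t ih =>
    rw [List.range_succ, List.map_append, List.foldl_append, ih]
    simp only [List.map_cons, List.map_nil, List.foldl_cons, List.foldl_nil]
    have hc : ((i : Int) + t) = ((i + t : Nat) : Int) := by push_cast; ring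
    rw [hc, PySem.List.pyGetD_natCast, PySem.List.pyGetD_natCast]
    have e1 : psum arr (i + t) - psum arr i + arr.getD (i + t) 0
        = psum arr (i + (t + 1)) - psum arr i := by
      have : i + (t + 1) = (i + t) + 1 := by omega
      rw [this, psum]; ring
    have e2 : psum arr2 (i + t) - psum arr2 i + arr2.getD (i + t) 0
        = psum arr2 (i + (t + 1)) - psum arr2 i := by
      have : i + (t + 1) = (i + t) + 1 := by omega
      rw [this, psum]; ring
    simp only [innerRes, e1, e2]
    have hidx : i + (t + 1) = i + t + 1 := by omega
    rw [hidx]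
    have hm : ((i + t : Nat) : Int) - (i : Int) + 1 = (t : Int) + 1 := by push_cast; ring
    rw [hm]
    have hcond : (psum arr (i + t + 1) - psum arr i = psum arr2 (i + t + 1) - psum arr2 i)
        ↔ pre2 arr arr2 (i + t + 1) = pre2 arr arr2 i := by
      unfold pre2; omega
    simp only [hcond]

theorem innerRes_ge (arr arr2 : List Int) (i : Nat) (res0 : Int) (t : Nat) :
    res0 ≤ innerRes arr arr2 i res0 t := by
  induction t with
  | zero => simp [innerRes]
  | succ t ih =>
    simp only [innerRes]
    split_ifs with h
    · exact le_trans ih (le_max_left _ _)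
    · exact ih

theorem innerRes_ub (arr arr2 : List Int) (i : Nat) (res0 : Int) (t : Nat)
    (j : Nat) (hij : i ≤ j) (hjt : j < i + t)
    (hp : pre2 arr arr2 (j + 1) = pre2 arr arr2 i) :
    (j : Int) - i + 1 ≤ innerRes arr arr2 i res0 t := by
  induction t with
  | zero => omega
  | succ t ih =>
    simp only [innerRes]
    by_cases hj : j < i + t
    · have := ih hj
      split_ifs with h
      · exact le_trans this (le_max_left _ _)
      · exact this
    · have hje : j = i + t := by omega
      subst hje
      rw [if_pos hp]
      have h2 : ((i + t : Nat) : Int) - i + 1 = (t : Int) + 1 := by push_cast; ring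
      rw [h2]
      exact le_max_right _ _

theorem innerRes_cases (arr arr2 : List Int) (i : Nat) (res0 : Int) (t : Nat) :
    innerRes arr arr2 i res0 t = res0 ∨
    ∃ j : Nat, i ≤ j ∧ j < i + t ∧ pre2 arr arr2 (j + 1) = pre2 arr arr2 i ∧
      innerRes arr arr2 i res0 t = (j : Int) - i + 1 := by
  induction t with
  | zero => left; rfl
  | succ t ih =>
    simp only [innerRes]
    split_ifs with h
    · rcases le_or_gt ((t : Int) + 1) (innerRes arr arr2 i res0 t) with hle | hlt
      · rw [max_eq_left hle]
        rcases ih with h0 | ⟨j, hij, hjt, hp, he⟩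
        · left; exact h0
        · right; exact ⟨j, hij, by omega, hp, he⟩
      · rw [max_eq_right (by omega)]
        right
        refine ⟨i + t, by omega, by omega, h, ?_⟩
        push_cast; ring
    · rcases ih with h0 | ⟨j, hij, hjt, hp, he⟩
      · left; exact h0
      · right; exact ⟨j, hij, by omega, hp, he⟩

theorem outerRes_props (arr arr2 : List Int) (u : Nat) (hu : u ≤ arr.length) :
    0 ≤ outerRes arr arr2 u ∧
    (∀ i j : Nat, i < u → i ≤ j → j < arr.length → pre2 arr arr2 (j + 1) = pre2 arr arr2 i →
      (j : Int) - i + 1 ≤ outerRes arr arr2 u) ∧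
    (outerRes arr arr2 u = 0 ∨ ∃ i j : Nat, i ≤ j ∧ j < arr.length ∧
      pre2 arr arr2 (j + 1) = pre2 arr arr2 i ∧ outerRes arr arr2 u = (j : Int) - i + 1) := by
  induction u with
  | zero => refine ⟨le_refl 0, by omega, Or.inl rfl⟩
  | succ u ih =>
    obtain ⟨ihn, ihu, ihc⟩ := ih (by omega)
    simp only [outerRes]
    refine ⟨le_trans ihn (innerRes_ge _ _ _ _ _), ?_, ?_⟩
    · intro i j hi hij hj hp
      by_cases hiu : i < u
      · exact le_trans (ihu i j hiu hij hj hp) (innerRes_ge _ _ _ _ _)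
      · have : i = u := by omega
        subst this
        exact innerRes_ub _ _ _ _ _ j hij (by omega) hp
    · rcases innerRes_cases arr arr2 u (outerRes arr arr2 u) (arr.length - u) with h0 | ⟨j, hij, hjt, hp, he⟩
      · rw [h0]; exact ihc
      · right; exact ⟨u, j, hij, by omega, hp, he⟩

theorem A_isAns (arr arr2 : List Int) : IsAns arr arr2 (longest_common_sub arr arr2) := by
  have hA : longest_common_sub arr arr2 = outerRes arr arr2 arr.length := by
    have h0 : longest_common_sub arr arr2 =
        (PySem.List.pyRange 0 (arr.length : Int) 1).foldl (fun result i =>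
          ((PySem.List.pyRange i (arr.length : Int) 1).foldl
            (fun (st : Int × Int × Int) j =>
              let c1 := st.2.1 + PySem.List.pyGetD arr j 0
              let c2 := st.2.2 + PySem.List.pyGetD arr2 j 0
              (if c1 = c2 then max st.1 (j - i + 1) else st.1, c1, c2))
            (result, 0, 0)).1) 0 := rfl
    rw [h0, PySem.List.pyRange_one]
    simp only [sub_zero, Int.toNat_natCast, zero_add]
    rw [List.foldl_map]
    have main : ∀ u : Nat, u ≤ arr.length →
        (List.range u).foldl (fun result (k : Nat) =>
          ((PySem.List.pyRange (k : Int) (arr.length : Int) 1).foldl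
            (fun (st : Int × Int × Int) j =>
              let c1 := st.2.1 + PySem.List.pyGetD arr j 0
              let c2 := st.2.2 + PySem.List.pyGetD arr2 j 0
              (if c1 = c2 then max st.1 (j - (k : Int) + 1) else st.1, c1, c2))
            (result, 0, 0)).1) 0 = outerRes arr arr2 u := by
      intro u hu
      induction u with
      | zero => rfl
      | succ u ih =>
        rw [List.range_succ, List.foldl_append]
        simp only [List.foldl_cons, List.foldl_nil]
        rw [ih (by omega), PySem.List.pyRange_one]
        have hlen : (((arr.length : Int) - (u : Int)).toNat) = arr.length - u := by omega
        rw [hlen, List.foldl_map]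
        have := innerA arr arr2 u (outerRes arr arr2 u) (arr.length - u)
        rw [List.foldl_map] at this
        rw [this]
        rfl
    exact main arr.length (le_refl _)
  rw [hA]
  obtain ⟨hn, hu, hc⟩ := outerRes_props arr arr2 arr.length (le_refl _)
  exact ⟨hn, fun i j hij hj hp => hu i j (by omega) hij hj hp, hc⟩

-- ---------- B side ----------

def bstep (arr2 : List Int) (st : PySem.Dict Int Int × Int × Int) (p : Int × Int) :
    PySem.Dict Int Int × Int × Int :=
  let s := st.2.1 + (p.2 - PySem.List.pyGetD arr2 p.1 0)
  match st.1.get? s with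
  | some f => (st.1, s, max st.2.2 (p.1 - f))
  | none => (st.1.insert s p.1, s, st.2.2)

def bstate (arr arr2 : List Int) : Nat → PySem.Dict Int Int × Int × Int
  | 0 => (PySem.Dict.ofList [(0, -1)], 0, 0)
  | t + 1 => bstep arr2 (bstate arr arr2 t) ((t : Int), arr.getD t 0)

theorem exists_minimal_pre2 (arr arr2 : List Int) (t : Nat) (v : Int)
    (h : ∃ m, m ≤ t ∧ pre2 arr arr2 m = v) :
    ∃ m, m ≤ t ∧ pre2 arr arr2 m = v ∧ ∀ k < m, pre2 arr arr2 k ≠ v := by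
  obtain ⟨m, hm, hv⟩ := h
  have hex : ∃ m, pre2 arr arr2 m = v := ⟨m, hv⟩
  refine ⟨Nat.find hex, le_trans (Nat.find_min' hex hv) hm, Nat.find_spec hex, fun k hk => Nat.find_min hex hk⟩

theorem bstate_props (arr arr2 : List Int) (t : Nat) :
    (bstate arr arr2 t).2.1 = pre2 arr arr2 t ∧
    (∀ v c, (bstate arr arr2 t).1.get? v = some c ↔
      ∃ m, m ≤ t ∧ pre2 arr arr2 m = v ∧ (∀ k < m, pre2 arr arr2 k ≠ v) ∧ c = (m : Int) - 1) ∧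
    0 ≤ (bstate arr arr2 t).2.2 ∧
    (∀ i j : Nat, i ≤ j → j < t → pre2 arr arr2 (j + 1) = pre2 arr arr2 i →
      (j : Int) - i + 1 ≤ (bstate arr arr2 t).2.2) ∧
    ((bstate arr arr2 t).2.2 = 0 ∨ ∃ i j : Nat, i ≤ j ∧ j < t ∧
      pre2 arr arr2 (j + 1) = pre2 arr arr2 i ∧ (bstate arr arr2 t).2.2 = (j : Int) - i + 1) := by
  induction t with
  | zero =>
    refine ⟨rfl, ?_, le_refl 0, by omega, Or.inl rfl⟩
    intro v c
    have h0 : (bstate arr arr2 0).1 = PySem.Dict.mk [((0 : Int), (-1 : Int))] := rfl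
    rw [h0, PySem.Dict.get?_mk_cons]
    constructor
    · intro h
      by_cases hv : ((0 : Int) == v)
      · rw [if_pos hv] at h
        refine ⟨0, le_refl 0, ?_, by omega, by simpa using h.symm⟩
        have : v = 0 := by simpa using (beq_iff_eq.mp hv).symm
        simp only [pre2, psum, this]; omega
      · rw [if_neg hv] at h
        simp [PySem.Dict.get?] at h
    · rintro ⟨m, hm, hv, _, hc⟩
      have : m = 0 := by omega
      subst this
      have hv0 : v = 0 := by simp only [pre2, psum] at hv; omega
      subst hv0 hc
      rfl
  | succ t ih =>
    obtain ⟨ihs, ihd, ihn, ihu, ihc⟩ := ih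
    have hs' : (bstate arr arr2 t).2.1 + (arr.getD t 0 - PySem.List.pyGetD arr2 (t : Int) 0)
        = pre2 arr arr2 (t + 1) := by
      rw [ihs, PySem.List.pyGetD_natCast]
      simp only [pre2, psum]; ring
    rcases hget : (bstate arr arr2 t).1.get? (pre2 arr arr2 (t + 1)) with _ | c
    -- none case: no earlier prefix equals pre2 (t+1); the dict gains the key pre2 (t+1) ↦ t
    · have hno : ∀ m, m ≤ t → pre2 arr arr2 m ≠ pre2 arr arr2 (t + 1) := by
        intro m hm hv
        obtain ⟨m', hm', hv', hmin'⟩ := exists_minimal_pre2 arr arr2 t _ ⟨m, hm, hv⟩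
        have h2 := (ihd _ ((m' : Int) - 1)).mpr ⟨m', hm', hv', hmin', rfl⟩
        rw [hget] at h2
        simp at h2
      have hst : bstate arr arr2 (t + 1)
          = ((bstate arr arr2 t).1.insert (pre2 arr arr2 (t + 1)) (t : Int),
             pre2 arr arr2 (t + 1), (bstate arr arr2 t).2.2) := by
        simp only [bstate, bstep, hs', hget]
      rw [hst]
      refine ⟨rfl, ?_, ihn, ?_, ?_⟩
      · intro v c
        simp only []
        rw [PySem.Dict.get?_insert]
        split_ifs with hv
        · subst hv
          constructor
          · rintro ⟨rfl⟩
            exact ⟨t + 1, le_refl _, rfl, fun k hk => hno k (by omega), by push_cast; ring⟩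
          · rintro ⟨m, hm, hv, hmin, hc⟩
            rcases Nat.lt_or_ge m (t + 1) with hlt | hge
            · exact absurd hv (hno m (by omega))
            · have : m = t + 1 := by omega
              subst this hc
              norm_num
        · rw [ihd v c]
          constructor
          · rintro ⟨m, hm, h1, h2, h3⟩; exact ⟨m, by omega, h1, h2, h3⟩
          · rintro ⟨m, hm, h1, h2, h3⟩
            refine ⟨m, ?_, h1, h2, h3⟩
            rcases Nat.lt_or_ge m (t + 1) with hlt | hge
            · omega
            · have : m = t + 1 := by omega
              subst this
              exact absurd h1.symm hv
      · intro i j hij hj hp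
        by_cases hjt : j < t
        · exact ihu i j hij hjt hp
        · have : j = t := by omega
          subst this
          exact absurd hp.symm (hno i (by omega))
      · rcases ihc with h0 | ⟨i, j, h1, h2, h3, h4⟩
        · left; exact h0
        · right; exact ⟨i, j, h1, by omega, h3, h4⟩
    -- some case: the first occurrence m of pre2 (t+1) gives the candidate t - (m - 1)
    · obtain ⟨m, hm, hv, hmin, hc⟩ := (ihd _ c).mp hget
      have hst : bstate arr arr2 (t + 1)
          = ((bstate arr arr2 t).1, pre2 arr arr2 (t + 1),
             max (bstate arr arr2 t).2.2 ((t : Int) - c)) := by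
        simp only [bstate, bstep, hs', hget]
      rw [hst]
      refine ⟨rfl, ?_, ?_, ?_, ?_⟩
      · intro v c'
        simp only []
        rw [ihd v c']
        constructor
        · rintro ⟨m', h1, h2, h3, h4⟩; exact ⟨m', by omega, h2, h3, h4⟩
        · rintro ⟨m', h1, h2, h3, h4⟩
          refine ⟨m', ?_, h2, h3, h4⟩
          rcases Nat.lt_or_ge m' (t + 1) with hlt | hge
          · omega
          · have hme : m' = t + 1 := by omega
            subst hme
            exact absurd (hv.trans h2) (by intro hh; exact (h3 m (by omega)) hh)
      · exact le_trans ihn (le_max_left _ _)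
      · intro i j hij hj hp
        by_cases hjt : j < t
        · exact le_trans (ihu i j hij hjt hp) (le_max_left _ _)
        · have : j = t := by omega
          subst this
          have him : m ≤ i := by
            by_contra hlt
            exact hmin i (by omega) hp.symm
          have h5 : (j : Int) - i + 1 ≤ (j : Int) - c := by omega
          exact le_trans h5 (le_max_right _ _)
      · rcases max_cases (bstate arr arr2 t).2.2 ((t : Int) - c) with ⟨he, _⟩ | ⟨he, _⟩
        · simp only [he]
          rcases ihc with h0 | ⟨i, j, h1, h2, h3, h4⟩
          · left; exact h0
          · right; exact ⟨i, j, h1, by omega, h3, h4⟩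
        · simp only [he]
          right
          exact ⟨m, t, by omega, by omega, hv.symm, by omega⟩

theorem B_eq_bstate (arr arr2 : List Int) :
    longest_common_sub_alt arr arr2 = (bstate arr arr2 arr.length).2.2 := by
  have h0 : longest_common_sub_alt arr arr2 =
      ((PySem.List.enumerate arr).foldl (bstep arr2)
        (PySem.Dict.ofList [(0, -1)], 0, 0)).2.2 := rfl
  rw [h0, PySem.List.enumerate_eq_map_pyRange (d := 0), PySem.List.pyRange_one]
  simp only [sub_zero, zero_add, List.map_map]
  rw [List.foldl_map]
  have main : ∀ u : Nat,
      (List.range u).foldl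
        (fun st (k : Nat) => bstep arr2 st (((k : Nat) : Int), PySem.List.pyGetD arr ((k : Nat) : Int) 0))
        (PySem.Dict.ofList [(0, -1)], 0, 0) = bstate arr arr2 u := by
    intro u
    induction u with
    | zero => rfl
    | succ u ih =>
      rw [List.range_succ, List.foldl_append]
      simp only [List.foldl_cons, List.foldl_nil]
      rw [ih, PySem.List.pyGetD_natCast]
      rfl
  exact congrArg (fun st => st.2.2) (main arr.length)

theorem B_isAns (arr arr2 : List Int) : IsAns arr arr2 (longest_common_sub_alt arr arr2) := by
  rw [B_eq_bstate]
  obtain ⟨_, _, hn, hu, hc⟩ := bstate_props arr arr2 arr.length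
  exact ⟨hn, hu, hc⟩

-- ===== VERDICT (by name: the statement is the Claim_ definition above) =====
theorem longest_common_sub_spec : Claim_equal_longest_common_sub := by
  intro arr arr2 _ _
  unfold Spec_longest_common_sub
  exact isAns_unique (A_isAns arr arr2) (B_isAns arr arr2)
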